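-- pv_equiv track=rewrite | github.com/AuralithAI/RT-DLM | core/gradient_accumulation.py | recommend_accumulation_steps
-- ===== SOURCE A (Python) =====
-- from typing import Dict, Any, Callable, Tuple, Optional
--
-- def recommend_accumulation_steps(
--     target_batch_size: int,
--     max_micro_batch_size: int,
--     num_devices: int = 1,
-- ) -> Tuple[int, int]:
--     """
--     Recommend accumulation steps to achieve target batch size.
--
--     Args:
--         target_batch_size: Desired effective batch size
--         max_micro_batch_size: Maximum batch size that fits in memory
--         num_devices: Number of devices for data parallelism
--
--     Returns:
--         Tuple of (accumulation_steps, actual_micro_batch_size)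
--     """
--     # Calculate minimum accumulation steps needed
--     min_accum = target_batch_size // (max_micro_batch_size * num_devices)
--     min_accum = max(1, min_accum)
--
--     # Find micro batch size that divides evenly
--     actual_micro_batch = target_batch_size // (min_accum * num_devices)
--
--     # Adjust if needed
--     while actual_micro_batch > max_micro_batch_size:
--         min_accum += 1
--         actual_micro_batch = target_batch_size // (min_accum * num_devices)
--
--     return min_accum, actual_micro_batch
-- ===== SOURCE B (Python) =====
-- def recommend_accumulation_steps(
--     target_batch_size: int,
--     max_micro_batch_size: int,
--     num_devices: int = 1,
-- ):
--     # Closed form: no loop. The answer is the smallest steps >= start with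
--     # target_batch_size // (steps * num_devices) <= max_micro_batch_size.
--     start = max(1, target_batch_size // (max_micro_batch_size * num_devices))
--     a_star = target_batch_size // ((max_micro_batch_size + 1) * num_devices) + 1
--     steps = max(start, a_star)
--     return steps, target_batch_size // (steps * num_devices)
-- ===== Notes on version B (the rewrite author's own statement) =====
-- stated objective: simpler
-- what changed: Replaces A's while loop (increment accumulation steps until the micro batch fits) with a closed-form formula: steps = max(start, target // ((max_micro+1) * num_devices) + 1), so no loop at all.
-- outside the precondition, e.g. on recommend_accumulation_steps(-10, -3, 1): A returns (3, -4), B returns (6, -2); on recommend_accumulation_steps(5, -2, 1): A does not finish within the time limit, B returns (1, 5); on recommend_accumulation_steps(8, 0, 2): A raises ZeroDivisionError, B raises ZeroDivisionError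
import Mathlib
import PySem

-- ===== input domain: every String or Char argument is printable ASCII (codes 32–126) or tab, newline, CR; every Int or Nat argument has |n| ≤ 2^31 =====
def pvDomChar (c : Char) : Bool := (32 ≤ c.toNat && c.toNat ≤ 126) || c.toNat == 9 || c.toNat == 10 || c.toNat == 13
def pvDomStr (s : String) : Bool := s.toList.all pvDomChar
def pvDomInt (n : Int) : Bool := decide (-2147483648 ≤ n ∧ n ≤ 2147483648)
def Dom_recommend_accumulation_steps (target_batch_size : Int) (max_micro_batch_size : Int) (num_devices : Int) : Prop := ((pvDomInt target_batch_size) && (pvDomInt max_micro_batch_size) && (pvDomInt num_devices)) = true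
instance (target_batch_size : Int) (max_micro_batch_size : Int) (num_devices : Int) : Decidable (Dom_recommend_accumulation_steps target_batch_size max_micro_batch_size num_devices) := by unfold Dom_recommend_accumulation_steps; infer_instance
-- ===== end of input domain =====

-- B replaces A's adjustment while-loop by a closed-form formula for the number of
-- accumulation steps (objective: simpler — no loop at all).

-- ===== PORT A =====
-- the while loop of A, fueled; under Pre_ the fuel (|target|+2) is proved sufficient,
-- so the fuel-0 branch is never the one that decides the result
def pvLoopA (target M n : Int) : Nat → Int → Int → Int × Int
  | 0, min_accum, actual => (min_accum, actual)
  | fuel + 1, min_accum, actual =>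
      if actual > M then
        pvLoopA target M n fuel (min_accum + 1)
          (PySem.Int.floordiv target ((min_accum + 1) * n))
      else (min_accum, actual)

def recommend_accumulation_steps (target_batch_size : Int) (max_micro_batch_size : Int) (num_devices : Int) : Int × Int :=
  let min_accum := PySem.Int.floordiv target_batch_size (max_micro_batch_size * num_devices)
  let min_accum := max 1 min_accum
  let actual := PySem.Int.floordiv target_batch_size (min_accum * num_devices)
  pvLoopA target_batch_size max_micro_batch_size num_devices
    (target_batch_size.natAbs + 2) min_accum actual

-- ===== PORT B =====
def recommend_accumulation_steps_alt (target_batch_size : Int) (max_micro_batch_size : Int) (num_devices : Int) : Int × Int :=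
  let start := max 1 (PySem.Int.floordiv target_batch_size (max_micro_batch_size * num_devices))
  let a_star := PySem.Int.floordiv target_batch_size ((max_micro_batch_size + 1) * num_devices) + 1
  let steps := max start a_star
  (steps, PySem.Int.floordiv target_batch_size (steps * num_devices))

-- ===== PRECONDITION & SPEC =====
-- Pre_ is the function's natural domain: a positive memory limit and a nonzero device
-- count. Outside it A raises ZeroDivisionError (max_micro_batch_size * num_devices = 0),
-- loops forever (most inputs with max_micro_batch_size < 0), or returns an accidental
-- value for a nonsensical negative memory limit (see claim.json cites).
def Pre_recommend_accumulation_steps (target_batch_size : Int) (max_micro_batch_size : Int) (num_devices : Int) : Prop :=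
  1 ≤ max_micro_batch_size ∧ num_devices ≠ 0
instance (target_batch_size : Int) (max_micro_batch_size : Int) (num_devices : Int) : Decidable (Pre_recommend_accumulation_steps target_batch_size max_micro_batch_size num_devices) := by unfold Pre_recommend_accumulation_steps; infer_instance

def pvWitness_recommend_accumulation_steps : Int × Int × Int := (64, 8, 2)

def Spec_recommend_accumulation_steps (target_batch_size : Int) (max_micro_batch_size : Int) (num_devices : Int) (out : Int × Int) : Prop := out = recommend_accumulation_steps_alt target_batch_size max_micro_batch_size num_devices
instance (target_batch_size : Int) (max_micro_batch_size : Int) (num_devices : Int) (out : Int × Int) : Decidable (Spec_recommend_accumulation_steps target_batch_size max_micro_batch_size num_devices out) := by unfold Spec_recommend_accumulation_steps; infer_instance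

-- ===== CLAIM (what is proved, stated in full; the proofs are below) =====
def Claim_equal_recommend_accumulation_steps : Prop := ∀ (target_batch_size : Int) (max_micro_batch_size : Int) (num_devices : Int), Dom_recommend_accumulation_steps target_batch_size max_micro_batch_size num_devices → Pre_recommend_accumulation_steps target_batch_size max_micro_batch_size num_devices → Spec_recommend_accumulation_steps target_batch_size max_micro_batch_size num_devices (recommend_accumulation_steps target_batch_size max_micro_batch_size num_devices)

-- ===== LEMMAS AND PROOFS =====

-- exit test of A's loop, characterised: the micro batch fits iff the step count has
-- reached B's closed-form threshold a_star = target // ((M+1)*n) + 1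
lemma pv_cond_iff (T M n a : Int) (hM : 1 ≤ M) (hn : n ≠ 0) (ha : 1 ≤ a) :
    PySem.Int.floordiv T (a * n) ≤ M ↔ PySem.Int.floordiv T ((M + 1) * n) + 1 ≤ a := by
  rcases hn.lt_or_gt with hneg | hpos
  · have e1 : PySem.Int.floordiv (-T) (a * -n) = PySem.Int.floordiv T (a * n) := by
      have h := PySem.Int.floordiv_neg_neg T (a * n)
      rw [show -(a * n) = a * -n by ring] at h
      exact h
    have e2 : PySem.Int.floordiv (-T) ((M + 1) * -n) = PySem.Int.floordiv T ((M + 1) * n) := by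
      have h := PySem.Int.floordiv_neg_neg T ((M + 1) * n)
      rw [show -((M + 1) * n) = (M + 1) * -n by ring] at h
      exact h
    have hp1 : (0 : Int) < a * -n := by nlinarith
    have hp2 : (0 : Int) < (M + 1) * -n := by nlinarith
    rw [← e1, ← e2]
    constructor
    · intro h
      have h1 : -T < (M + 1) * (a * -n) :=
        (PySem.Int.floordiv_lt_iff_lt_mul hp1).mp (by omega)
      have h2 : PySem.Int.floordiv (-T) ((M + 1) * -n) < a := by
        rw [PySem.Int.floordiv_lt_iff_lt_mul hp2]; nlinarith
      omega
    · intro h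
      have h1 : -T < a * ((M + 1) * -n) :=
        (PySem.Int.floordiv_lt_iff_lt_mul hp2).mp (by omega)
      have h2 : PySem.Int.floordiv (-T) (a * -n) < M + 1 := by
        rw [PySem.Int.floordiv_lt_iff_lt_mul hp1]; nlinarith
      omega
  · have hp1 : (0 : Int) < a * n := by nlinarith
    have hp2 : (0 : Int) < (M + 1) * n := by nlinarith
    constructor
    · intro h
      have h1 : T < (M + 1) * (a * n) :=
        (PySem.Int.floordiv_lt_iff_lt_mul hp1).mp (by omega)
      have h2 : PySem.Int.floordiv T ((M + 1) * n) < a := by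
        rw [PySem.Int.floordiv_lt_iff_lt_mul hp2]; nlinarith
      omega
    · intro h
      have h1 : T < a * ((M + 1) * n) :=
        (PySem.Int.floordiv_lt_iff_lt_mul hp2).mp (by omega)
      have h2 : PySem.Int.floordiv T (a * n) < M + 1 := by
        rw [PySem.Int.floordiv_lt_iff_lt_mul hp1]; nlinarith
      omega

lemma pv_floordiv_lt_natAbs_succ (T k : Int) (hk : 0 < k) :
    PySem.Int.floordiv T k < (T.natAbs : Int) + 1 := by
  rw [PySem.Int.floordiv_lt_iff_lt_mul hk]
  nlinarith [Int.le_natAbs (a := T), Int.natCast_nonneg T.natAbs]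

lemma pv_floordiv_le_natAbs (T k : Int) (hk : k ≠ 0) :
    PySem.Int.floordiv T k ≤ (T.natAbs : Int) := by
  rcases hk.lt_or_gt with h | h
  · have e := PySem.Int.floordiv_neg_neg (-T) (-k)
    simp only [neg_neg] at e
    rw [e]
    have := pv_floordiv_lt_natAbs_succ (-T) (-k) (by omega)
    simp only [Int.natAbs_neg] at this
    omega
  · have := pv_floordiv_lt_natAbs_succ T k h
    omega

-- A's loop, started at any step count a ≥ 1 with enough fuel, stops exactly at
-- max a a_star
lemma pv_loop_eq (T M n : Int) (hM : 1 ≤ M) (hn : n ≠ 0) :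
    ∀ (f : Nat) (a : Int), 1 ≤ a →
      (PySem.Int.floordiv T ((M + 1) * n) + 1 - a).toNat ≤ f →
      pvLoopA T M n f a (PySem.Int.floordiv T (a * n)) =
        (max a (PySem.Int.floordiv T ((M + 1) * n) + 1),
         PySem.Int.floordiv T (max a (PySem.Int.floordiv T ((M + 1) * n) + 1) * n)) := by
  intro f
  induction f with
  | zero =>
    intro a ha hf
    have hs : PySem.Int.floordiv T ((M + 1) * n) + 1 ≤ a := by omega
    rw [max_eq_left hs]
    simp [pvLoopA]
  | succ f ih =>
    intro a ha hf
    by_cases hc : M < PySem.Int.floordiv T (a * n)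
    · have hlt : a < PySem.Int.floordiv T ((M + 1) * n) + 1 := by
        by_contra hcon
        exact absurd ((pv_cond_iff T M n a hM hn ha).mpr (by omega)) (by omega)
      simp only [pvLoopA, gt_iff_lt, if_pos hc]
      rw [ih (a + 1) (by omega) (by omega)]
      rw [max_eq_right (by omega : a ≤ PySem.Int.floordiv T ((M + 1) * n) + 1),
          max_eq_right (by omega : a + 1 ≤ PySem.Int.floordiv T ((M + 1) * n) + 1)]
    · have hs : PySem.Int.floordiv T ((M + 1) * n) + 1 ≤ a :=
        (pv_cond_iff T M n a hM hn ha).mp (by omega)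
      rw [max_eq_left hs]
      simp [pvLoopA, hc]

-- ===== VERDICT (by name: the statement is the Claim_ definition above) =====
theorem recommend_accumulation_steps_spec : Claim_equal_recommend_accumulation_steps := by
  intro T M n _hdom hpre
  obtain ⟨hM, hn⟩ := hpre
  unfold Spec_recommend_accumulation_steps recommend_accumulation_steps recommend_accumulation_steps_alt
  have hstart : (1 : Int) ≤ max 1 (PySem.Int.floordiv T (M * n)) := le_max_left _ _
  have hbound : PySem.Int.floordiv T ((M + 1) * n) ≤ (T.natAbs : Int) :=
    pv_floordiv_le_natAbs T ((M + 1) * n) (mul_ne_zero (by omega) hn)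
  rw [pv_loop_eq T M n hM hn (T.natAbs + 2) (max 1 (PySem.Int.floordiv T (M * n)))
      hstart (by omega)]
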